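-- pv_equiv track=rewrite | github.com/eraserkason/auto_reverse | main_project_backend/services/config_service.py | get_selectable_skill_paths
-- ===== SOURCE A (Python) =====
-- from typing import Any
--
-- def get_selectable_skill_paths(entries: list[dict[str, Any]] | None = None) -> list[str]:
--     skill_entries = entries or []
--     parent_paths = {
--         str(entry.get("parent_path") or "").strip()
--         for entry in skill_entries
--         if str(entry.get("parent_path") or "").strip()
--     }
--     return [
--         entry["path"]
--         for entry in skill_entries
--         if not str(entry.get("parent_path") or "").strip() or entry["path"] in parent_paths
--     ]
-- ===== SOURCE B (Python) =====
-- from typing import Any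
--
-- def get_selectable_skill_paths(entries: list[dict[str, Any]] | None = None) -> list[str]:
--     # Online single pass: entries wait in `pending` until their path shows up as a parent;
--     # positions are restored at the end by sorting on the original index.
--     skill_entries = entries or []
--     seen = set()          # stripped non-empty parent_paths seen so far
--     accepted = []         # (index, path) pairs already known selectable
--     pending = []          # (index, path) pairs waiting for their path to appear as a parent
--     for i, entry in enumerate(skill_entries):
--         path = entry["path"]
--         parent = str(entry.get("parent_path") or "").strip()
--         if parent and parent not in seen:
--             seen.add(parent)
--             accepted.extend(t for t in pending if t[1] == parent)
--             pending = [t for t in pending if t[1] != parent]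
--         if not parent or path in seen:
--             accepted.append((i, path))
--         else:
--             pending.append((i, path))
--     accepted.sort(key=lambda t: t[0])
--     return [path for _, path in accepted]
-- ===== Notes on version B (the rewrite author's own statement) =====
-- stated objective: alternative
-- what changed: Replaces A's two staged passes (precompute the set of stripped parent paths, then filter) by an online single pass that holds undecided entries in a pending list, flushes them to accepted when their path first appears as a parent, and restores the original order at the end by sorting the accepted (index, path) pairs by index.
import Mathlib
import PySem

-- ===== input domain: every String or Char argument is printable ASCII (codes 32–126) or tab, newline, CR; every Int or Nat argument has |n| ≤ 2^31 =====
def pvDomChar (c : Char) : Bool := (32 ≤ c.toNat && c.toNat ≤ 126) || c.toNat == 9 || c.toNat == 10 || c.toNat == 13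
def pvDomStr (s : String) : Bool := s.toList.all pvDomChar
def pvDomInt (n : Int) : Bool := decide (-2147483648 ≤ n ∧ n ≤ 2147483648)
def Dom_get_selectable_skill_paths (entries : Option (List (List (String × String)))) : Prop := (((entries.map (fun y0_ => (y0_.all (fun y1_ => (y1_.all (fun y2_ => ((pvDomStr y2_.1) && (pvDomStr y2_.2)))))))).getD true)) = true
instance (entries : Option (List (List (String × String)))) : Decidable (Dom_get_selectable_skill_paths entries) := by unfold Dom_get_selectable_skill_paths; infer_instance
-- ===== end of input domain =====

-- B replaces A's two staged passes (build the parent set, then filter) by an online single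
-- pass with a pending list flushed when a path first appears as a parent; the original order
-- is restored by a final sort on the index (alternative decomposition, same return value).

-- shared helpers: str(entry.get("parent_path") or "").strip()  and  entry["path"] (total form; Pre_ excludes the KeyError)
def pvStripParent (e : List (String × String)) : String :=
  PySem.Str.strip (((PySem.Dict.mk e).get? "parent_path").getD "")
def pvPath (e : List (String × String)) : String :=
  ((PySem.Dict.mk e).get? "path").getD ""

-- ===== PORT A =====
def get_selectable_skill_paths (entries : Option (List (List (String × String)))) : List String :=
  let skill_entries := entries.getD []
  let parent_paths : PySem.Set String :=
    PySem.Set.ofList ((skill_entries.filter (fun e => pvStripParent e != "")).map pvStripParent)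
  (skill_entries.filter
      (fun e => pvStripParent e == "" || PySem.Set.contains parent_paths (pvPath e))).map pvPath

-- ===== PORT B =====
-- one iteration of B's loop body: state = (seen, accepted, pending)
def pvStepB (st : PySem.Set String × List (Int × String) × List (Int × String))
    (ie : Int × List (String × String)) :
    PySem.Set String × List (Int × String) × List (Int × String) :=
  let path := pvPath ie.2
  let parent := pvStripParent ie.2
  let st1 :=
    if parent != "" && !(PySem.Set.contains st.1 parent) then
      (PySem.Set.add st.1 parent,
       st.2.1 ++ st.2.2.filter (fun t => t.2 == parent),
       st.2.2.filter (fun t => t.2 != parent))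
    else st
  if parent == "" || PySem.Set.contains st1.1 path then
    (st1.1, st1.2.1 ++ [(ie.1, path)], st1.2.2)
  else
    (st1.1, st1.2.1, st1.2.2 ++ [(ie.1, path)])

def get_selectable_skill_paths_alt (entries : Option (List (List (String × String)))) : List String :=
  let skill_entries := entries.getD []
  let st := (PySem.List.enumerate skill_entries 0).foldl pvStepB (PySem.Set.empty, [], [])
  (PySem.List.sorted st.2.1 (fun t => t.1) false).map (fun t => t.2)

-- ===== PRECONDITION & SPEC =====
-- Pre_ excludes exactly the inputs where some entry lacks the "path" key: Python A raises KeyError there.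
def Pre_get_selectable_skill_paths (entries : Option (List (List (String × String)))) : Prop :=
  ∀ e ∈ entries.getD [], ((PySem.Dict.mk e).get? "path").isSome = true
instance (entries : Option (List (List (String × String)))) : Decidable (Pre_get_selectable_skill_paths entries) := by unfold Pre_get_selectable_skill_paths; infer_instance

def pvWitness_get_selectable_skill_paths : (Option (List (List (String × String)))) :=
  some [[("path", "a")], [("path", "b"), ("parent_path", "a")]]

def Spec_get_selectable_skill_paths (entries : Option (List (List (String × String)))) (out : List String) : Prop := out = get_selectable_skill_paths_alt entries
instance (entries : Option (List (List (String × String)))) (out : List String) : Decidable (Spec_get_selectable_skill_paths entries out) := by unfold Spec_get_selectable_skill_paths; infer_instance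

-- ===== CLAIM (what is proved, stated in full; the proofs are below) =====
def Claim_equal_get_selectable_skill_paths : Prop := ∀ (entries : Option (List (List (String × String)))), Dom_get_selectable_skill_paths entries → Pre_get_selectable_skill_paths entries → Spec_get_selectable_skill_paths entries (get_selectable_skill_paths entries)

-- ===== LEMMAS AND PROOFS =====

-- A's parent set, as a function of the processed prefix
def pvParents (P : List (List (String × String))) : PySem.Set String :=
  PySem.Set.ofList ((P.filter (fun e => pvStripParent e != "")).map pvStripParent)

-- the (index, path) pairs of P selected / still pending relative to a seen-set S
def pvSel (P : List (List (String × String))) (S : PySem.Set String) : List (Int × String) :=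
  ((PySem.List.enumerate P 0).filter
      (fun ie => pvStripParent ie.2 == "" || PySem.Set.contains S (pvPath ie.2))).map
    (fun ie => (ie.1, pvPath ie.2))

def pvPend (P : List (List (String × String))) (S : PySem.Set String) : List (Int × String) :=
  ((PySem.List.enumerate P 0).filter
      (fun ie => pvStripParent ie.2 != "" && !(PySem.Set.contains S (pvPath ie.2)))).map
    (fun ie => (ie.1, pvPath ie.2))

lemma pv_filter_or_perm {α : Type} (l : List α) (p q r : α → Bool)
    (hr : ∀ x ∈ l, r x = (p x || q x))
    (h : ∀ x ∈ l, ¬(p x = true ∧ q x = true)) :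
    (l.filter r).Perm (l.filter p ++ l.filter q) := by
  induction l with
  | nil => simp
  | cons x t ih =>
    have ih' := ih (fun y hy => hr y (.tail _ hy)) (fun y hy => h y (.tail _ hy))
    have hrx := hr x (.head _)
    by_cases hp : p x = true
    · have hq : q x = false := by
        by_contra hq'
        exact h x (.head _) ⟨hp, by simpa using hq'⟩
      simp only [List.filter_cons, hrx, hp, hq, Bool.true_or, if_true, Bool.false_eq_true, if_false]
      exact ih'.cons x
    · have hp' : p x = false := by simpa using hp
      by_cases hq : q x = true
      · simp only [List.filter_cons, hrx, hp', hq, Bool.false_or, if_true, Bool.false_eq_true,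
          if_false]
        exact (ih'.cons x).trans List.perm_middle.symm
      · have hq' : q x = false := by simpa using hq
        simp only [List.filter_cons, hrx, hp', hq', Bool.false_or, Bool.false_eq_true, if_false]
        exact ih'

lemma pv_parents_append (P : List (List (String × String))) (e : List (String × String)) :
    pvParents (P ++ [e]) =
      if pvStripParent e != "" then PySem.Set.add (pvParents P) (pvStripParent e)
      else pvParents P := by
  unfold pvParents
  rw [List.filter_append, List.map_append]
  by_cases h : pvStripParent e != ""
  · simp only [h, if_true, List.filter_cons]
    simp only [List.filter_nil, List.map_cons, List.map_nil]
    rw [PySem.Set.ofList_eq_foldl, PySem.Set.ofList_eq_foldl, List.foldl_append]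
    rfl
  · have h' : (pvStripParent e != "") = false := by simpa using h
    simp [h']

lemma pv_pend_add (P : List (List (String × String))) (S : PySem.Set String) (q : String) :
    pvPend P (PySem.Set.add S q) = (pvPend P S).filter (fun t => t.2 != q) := by
  unfold pvPend
  rw [List.filter_map, List.filter_filter]
  apply congrArg
  apply List.filter_congr
  intro ie _
  by_cases hc : pvPath ie.2 ∈ S <;> by_cases he : pvPath ie.2 = q <;>
    cases hb : (pvStripParent ie.2 == "") <;>
      simp [Function.comp, PySem.Set.contains, PySem.Set.mem_add, hb, hc, he, bne]

lemma pv_sel_add_perm (P : List (List (String × String))) (S : PySem.Set String) (q : String) :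
    (pvSel P (PySem.Set.add S q)).Perm
      (pvSel P S ++ (pvPend P S).filter (fun t => t.2 == q)) := by
  unfold pvSel pvPend
  rw [List.filter_map, List.filter_filter, ← List.map_append]
  apply List.Perm.map
  refine pv_filter_or_perm _ _ _ _ ?_ ?_
  · intro ie _
    by_cases hc : pvPath ie.2 ∈ S <;> by_cases he : pvPath ie.2 = q <;>
      cases hb : (pvStripParent ie.2 == "") <;>
        simp [Function.comp, PySem.Set.contains, PySem.Set.mem_add, hb, hc, he, bne]
  · intro ie _
    by_cases hc : pvPath ie.2 ∈ S <;>
      cases hb : (pvStripParent ie.2 == "") <;>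
        simp [Function.comp, PySem.Set.contains, hb, hc, bne]

lemma pv_sel_append (P : List (List (String × String))) (e : List (String × String))
    (S : PySem.Set String) :
    pvSel (P ++ [e]) S = pvSel P S ++
      (if pvStripParent e == "" || PySem.Set.contains S (pvPath e) then
        [((0 + (P.length : Int)), pvPath e)] else []) := by
  unfold pvSel
  rw [PySem.List.enumerate_append, List.filter_append, List.map_append]
  apply congrArg
  rw [PySem.List.enumerate_cons, PySem.List.enumerate_nil]
  split <;> simp_all

lemma pv_pend_append (P : List (List (String × String))) (e : List (String × String))
    (S : PySem.Set String) :
    pvPend (P ++ [e]) S = pvPend P S ++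
      (if pvStripParent e != "" && !(PySem.Set.contains S (pvPath e)) then
        [((0 + (P.length : Int)), pvPath e)] else []) := by
  unfold pvPend
  rw [PySem.List.enumerate_append, List.filter_append, List.map_append]
  apply congrArg
  rw [PySem.List.enumerate_cons, PySem.List.enumerate_nil]
  split <;> simp_all

lemma pv_step_inv (P : List (List (String × String))) (e : List (String × String))
    (st : PySem.Set String × List (Int × String) × List (Int × String))
    (h1 : st.1 = pvParents P)
    (h2 : st.2.1.Perm (pvSel P (pvParents P)))
    (h3 : st.2.2 = pvPend P (pvParents P)) :
    (pvStepB st ((0 + (P.length : Int)), e)).1 = pvParents (P ++ [e]) ∧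
    (pvStepB st ((0 + (P.length : Int)), e)).2.1.Perm (pvSel (P ++ [e]) (pvParents (P ++ [e]))) ∧
    (pvStepB st ((0 + (P.length : Int)), e)).2.2 = pvPend (P ++ [e]) (pvParents (P ++ [e])) := by
  by_cases hq : (pvStripParent e == "") = true
  · -- empty parent: no flush, accept the entry
    have hq' : (pvStripParent e != "") = false := by simp [bne, hq]
    have hP : pvParents (P ++ [e]) = pvParents P := by rw [pv_parents_append]; simp [hq']
    have c1 : (pvStripParent e != "" && !(PySem.Set.contains st.1 (pvStripParent e))) = false := by
      simp [hq']
    have c2 : (pvStripParent e == "" || PySem.Set.contains st.1 (pvPath e)) = true := by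
      simp [hq]
    simp only [pvStepB, c1, Bool.false_eq_true, if_false, c2, if_true]
    rw [hP]
    refine ⟨h1, ?_, ?_⟩
    · rw [pv_sel_append P e (pvParents P)]
      simp only [hq, Bool.true_or, if_true]
      exact h2.append (List.Perm.refl _)
    · rw [pv_pend_append P e (pvParents P)]
      simp only [hq', Bool.false_and, Bool.false_eq_true, if_false, List.append_nil]
      exact h3
  · have hq1 : (pvStripParent e != "") = true := by simp [bne]; simpa using hq
    have hq0 : (pvStripParent e == "") = false := by simpa using hq
    by_cases hc : pvStripParent e ∈ pvParents P
    · -- parent already seen: no flush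
      have hP : pvParents (P ++ [e]) = pvParents P := by
        rw [pv_parents_append]; simp [hq1, PySem.Set.add, hc]
      have c1 : (pvStripParent e != "" && !(PySem.Set.contains (pvParents P) (pvStripParent e))) = false := by
        simp [hc]
      simp only [pvStepB, h1, c1, Bool.false_eq_true, if_false, hq0, Bool.false_or]
      by_cases hp : pvPath e ∈ pvParents P
      · have hpb : PySem.Set.contains (pvParents P) (pvPath e) = true := by
          simpa [PySem.Set.contains] using hp
        rw [if_pos hpb]
        rw [hP]
        refine ⟨rfl, ?_, ?_⟩
        · rw [pv_sel_append P e (pvParents P)]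
          simp only [hq0, Bool.false_or, hpb, if_true]
          exact h2.append (List.Perm.refl _)
        · rw [pv_pend_append P e (pvParents P)]
          simp only [hq1, hpb, Bool.not_true, Bool.and_false, Bool.false_eq_true, if_false,
            List.append_nil]
          exact h3
      · have hpb : PySem.Set.contains (pvParents P) (pvPath e) = false := by
          simpa [PySem.Set.contains] using hp
        rw [if_neg (by simp [hp])]
        rw [hP]
        refine ⟨rfl, ?_, ?_⟩
        · rw [pv_sel_append P e (pvParents P)]
          simp only [hq0, Bool.false_or, hpb, Bool.false_eq_true, if_false, List.append_nil]
          exact h2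
        · rw [pv_pend_append P e (pvParents P)]
          simp only [hq1, hpb, Bool.not_false, Bool.and_true, if_true]
          exact congrArg (· ++ _) h3
    · -- new parent: flush the pending entries whose path equals it
      have hP : pvParents (P ++ [e]) = PySem.Set.add (pvParents P) (pvStripParent e) := by
        rw [pv_parents_append]; simp [hq1]
      have c1 : (pvStripParent e != "" && !(PySem.Set.contains (pvParents P) (pvStripParent e))) = true := by
        simp [hq1, hc]
      simp only [pvStepB, h1, h3, c1, if_true, hq0, Bool.false_or]
      have hsel : (st.2.1 ++ (pvPend P (pvParents P)).filter (fun t => t.2 == pvStripParent e)).Perm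
          (pvSel P (PySem.Set.add (pvParents P) (pvStripParent e))) := by
        refine (List.Perm.append ?_ (List.Perm.refl _)).trans
          (pv_sel_add_perm P (pvParents P) (pvStripParent e)).symm
        exact h2
      have hpend : (pvPend P (pvParents P)).filter (fun t => t.2 != pvStripParent e)
          = pvPend P (PySem.Set.add (pvParents P) (pvStripParent e)) :=
        (pv_pend_add P (pvParents P) (pvStripParent e)).symm
      by_cases hp : pvPath e ∈ PySem.Set.add (pvParents P) (pvStripParent e)
      · have hpb : PySem.Set.contains (PySem.Set.add (pvParents P) (pvStripParent e)) (pvPath e)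
            = true := by simpa [PySem.Set.contains] using hp
        rw [if_pos hpb]
        rw [hP]
        refine ⟨rfl, ?_, ?_⟩
        · rw [pv_sel_append P e _]
          simp only [hq0, Bool.false_or, hpb, if_true]
          exact hsel.append (List.Perm.refl _)
        · rw [pv_pend_append P e _]
          simp only [hq1, hpb, Bool.not_true, Bool.and_false, Bool.false_eq_true, if_false,
            List.append_nil]
          exact hpend
      · have hpb : PySem.Set.contains (PySem.Set.add (pvParents P) (pvStripParent e)) (pvPath e)
            = false := by simpa [PySem.Set.contains] using hp
        rw [if_neg (by simp [hp])]
        rw [hP]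
        refine ⟨rfl, ?_, ?_⟩
        · rw [pv_sel_append P e _]
          simp only [hq0, Bool.false_or, hpb, Bool.false_eq_true, if_false, List.append_nil]
          exact hsel
        · rw [pv_pend_append P e _]
          simp only [hq1, hpb, Bool.not_false, Bool.and_true, if_true]
          exact congrArg (· ++ _) hpend

lemma pv_inv (P : List (List (String × String))) :
    ((PySem.List.enumerate P 0).foldl pvStepB (PySem.Set.empty, [], [])).1 = pvParents P ∧
    ((PySem.List.enumerate P 0).foldl pvStepB (PySem.Set.empty, [], [])).2.1.Perm (pvSel P (pvParents P)) ∧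
    ((PySem.List.enumerate P 0).foldl pvStepB (PySem.Set.empty, [], [])).2.2 = pvPend P (pvParents P) := by
  induction P using List.reverseRecOn with
  | nil => exact ⟨rfl, by simp [pvSel, PySem.List.enumerate_nil], by simp [pvPend, PySem.List.enumerate_nil]⟩
  | append_singleton P e ih =>
    obtain ⟨h1, h2, h3⟩ := ih
    rw [PySem.List.enumerate_append, List.foldl_append, PySem.List.enumerate_cons,
      PySem.List.enumerate_nil]
    simp only [List.foldl_cons, List.foldl_nil]
    exact pv_step_inv P e _ h1 h2 h3

lemma pv_sel_pairwise (P : List (List (String × String))) (S : PySem.Set String) :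
    (pvSel P S).Pairwise (fun a b => a.1 < b.1) := by
  refine List.Pairwise.map _ (fun a b h => h) (List.Pairwise.filter _ ?_)
  exact PySem.List.pairwise_lt_enumerate P 0

lemma pv_enum_filter_map (xs : List (List (String × String))) (s : Int)
    (p : List (String × String) → Bool) (f : List (String × String) → String) :
    (((PySem.List.enumerate xs s).filter (fun ie => p ie.2)).map (fun ie => f ie.2))
      = (xs.filter p).map f := by
  induction xs generalizing s with
  | nil => simp [PySem.List.enumerate_nil]
  | cons x t ih =>
    rw [PySem.List.enumerate_cons, List.filter_cons, List.filter_cons]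
    cases hp : p x <;> simp [ih]

lemma pv_sel_map_snd (P : List (List (String × String))) (S : PySem.Set String) :
    (pvSel P S).map (fun t => t.2)
      = (P.filter (fun e => pvStripParent e == "" || PySem.Set.contains S (pvPath e))).map pvPath := by
  unfold pvSel
  rw [List.map_map]
  have h := pv_enum_filter_map P 0
    (fun e => pvStripParent e == "" || PySem.Set.contains S (pvPath e)) pvPath
  simpa [Function.comp] using h

-- ===== VERDICT (by name: the statement is the Claim_ definition above) =====
theorem get_selectable_skill_paths_spec : Claim_equal_get_selectable_skill_paths := by
  intro entries _ _
  show get_selectable_skill_paths entries = get_selectable_skill_paths_alt entries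
  simp only [get_selectable_skill_paths, get_selectable_skill_paths_alt]
  obtain ⟨h1, h2, h3⟩ := pv_inv (entries.getD [])
  rw [PySem.List.sorted_eq_of_perm_of_pairwise_lt _ _ (fun t : Int × String => t.1)
      h2.symm (pv_sel_pairwise _ _),
    pv_sel_map_snd]
  rfl
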